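-- pv_equiv track=rewrite | github.com/hyul77/Algorithm | 프로그래머스/Lv.0/181932. 코드 처리하기/코드 처리하기.py | solution
-- ===== SOURCE A (Python) =====
-- def solution(code):
--     mode = 0
--     ret_l = []
--
--     for i, char in enumerate(code):
--         if char == "1":
--             mode = 1 - mode
--             continue
--
--         if mode == 0 and i % 2 == 0:
--             ret_l.append(char)
--         elif mode == 1 and i % 2 == 1:
--             ret_l.append(char)
--
--     ret = "".join(ret_l)
--     if not ret:
--         return "EMPTY"
--     return ret
-- ===== SOURCE B (Python) =====
-- def solution(code):
--     # pass 1: inclusive parity of '1's at each index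
--     par = 0
--     pars = []
--     for c in code:
--         if c == "1":
--             par = 1 - par
--         pars.append(par)
--     # pass 2: keep non-'1' chars whose index parity matches the mode
--     ret = "".join(c for i, (c, p) in enumerate(zip(code, pars))
--                   if c != "1" and i % 2 == p)
--     return ret or "EMPTY"
-- ===== Notes on version B (the rewrite author's own statement) =====
-- stated objective: alternative
-- what changed: Replaced the inline toggling state machine with a two-pass decomposition: first precompute an inclusive toggle-parity table over the string, then filter chars by index-parity against that table in a comprehension.
import Mathlib
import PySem

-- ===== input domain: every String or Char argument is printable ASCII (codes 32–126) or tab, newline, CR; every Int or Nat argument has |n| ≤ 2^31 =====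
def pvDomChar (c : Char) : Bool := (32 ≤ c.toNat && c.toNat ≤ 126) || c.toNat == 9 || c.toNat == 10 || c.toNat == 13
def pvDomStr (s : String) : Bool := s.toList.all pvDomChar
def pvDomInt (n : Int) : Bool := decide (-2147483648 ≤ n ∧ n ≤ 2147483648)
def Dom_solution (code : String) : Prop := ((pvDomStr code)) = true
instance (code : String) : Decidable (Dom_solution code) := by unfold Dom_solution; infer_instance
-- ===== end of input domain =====

-- B replaces A's inline mode-toggling state machine with a two-pass decomposition
-- (precomputed parity table, then a filtering pass); same cost, different structure.

-- ===== PORT A =====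
-- the for-loop of A: state (index, mode), appending kept chars
def aGo : List Char → Int → Int → List Char
  | [], _, _ => []
  | c :: cs, i, m =>
    if c = '1' then aGo cs (i + 1) (1 - m)
    else if m = 0 ∧ i % 2 = 0 then c :: aGo cs (i + 1) m
    else if m = 1 ∧ i % 2 = 1 then c :: aGo cs (i + 1) m
    else aGo cs (i + 1) m

def solution (code : String) : String :=
  let ret := aGo code.toList 0 0
  if ret = [] then "EMPTY" else String.mk ret

-- ===== PORT B =====
-- pass 1 of B: inclusive parity of '1's at each index
def bPars : List Char → Int → List Int
  | [], _ => []
  | c :: cs, p =>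
    let p' := if c = '1' then 1 - p else p
    p' :: bPars cs p'
  termination_by l => l.length

-- pass 2 of B: the filtering comprehension over enumerate(zip(code, pars))
def bFilter : List (Char × Int) → Int → List Char
  | [], _ => []
  | (c, p) :: rest, i =>
    (if c ≠ '1' ∧ i % 2 = p then [c] else []) ++ bFilter rest (i + 1)

def solution_alt (code : String) : String :=
  let l := code.toList
  let kept := bFilter (l.zip (bPars l 0)) 0
  if kept = [] then "EMPTY" else String.mk kept

-- ===== PRECONDITION & SPEC =====
def Spec_solution (code : String) (out : String) : Prop := out = solution_alt code
instance (code : String) (out : String) : Decidable (Spec_solution code out) := by unfold Spec_solution; infer_instance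

-- ===== CLAIM (what is proved, stated in full; the proofs are below) =====
def Claim_equal_solution : Prop := ∀ (code : String), Dom_solution code → Spec_solution code (solution code)

-- ===== LEMMAS AND PROOFS =====
theorem aGo_eq_bFilter (l : List Char) (i m : Int) (hm : m = 0 ∨ m = 1) :
    aGo l i m = bFilter (l.zip (bPars l m)) i := by
  induction l generalizing i m with
  | nil => rfl
  | cons c cs ih =>
    by_cases h1 : c = '1'
    · simp [aGo, bPars, bFilter, h1]
      exact ih (i + 1) (1 - m) (by omega)
    · have hmod : i % 2 = 0 ∨ i % 2 = 1 := by omega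
      have hrec := ih (i + 1) m hm
      simp only [aGo, bPars, bFilter, h1, if_false, List.zip_cons_cons]
      rcases hm with hm | hm <;> subst hm <;> rcases hmod with hi | hi <;>
        simp [hi, h1, hrec]

-- ===== VERDICT (by name: the statement is the Claim_ definition above) =====
theorem solution_spec : Claim_equal_solution := by
  intro code _
  unfold Spec_solution solution solution_alt
  rw [aGo_eq_bFilter _ _ _ (Or.inl rfl)]
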